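-- pv_equiv track=rewrite | github.com/fadwabaali/Bootcamp-Geeks-Institue | week1/Day2/Challenge1.py | create_letter
-- ===== SOURCE A (Python) =====
-- def create_letter(word):
--     letter_dict = {}
--
--     for index, letter in enumerate(word):
--         if letter in letter_dict:
--             letter_dict[letter].append(index)
--         else:
--             letter_dict[letter] = [index]
--
--     return letter_dict
-- ===== SOURCE B (Python) =====
-- def create_letter(word):
--     letters = list(dict.fromkeys(word))
--     return {c: [i for i, x in enumerate(word) if x == c] for c in letters}
-- ===== Notes on version B (the rewrite author's own statement) =====
-- stated objective: idiomatic
-- what changed: A's single accumulating pass that grows per-letter lists in a dict is replaced by first taking the distinct letters in order (dict.fromkeys) and then a dict comprehension that rescans the word once per distinct letter to collect its indices.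
import Mathlib
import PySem

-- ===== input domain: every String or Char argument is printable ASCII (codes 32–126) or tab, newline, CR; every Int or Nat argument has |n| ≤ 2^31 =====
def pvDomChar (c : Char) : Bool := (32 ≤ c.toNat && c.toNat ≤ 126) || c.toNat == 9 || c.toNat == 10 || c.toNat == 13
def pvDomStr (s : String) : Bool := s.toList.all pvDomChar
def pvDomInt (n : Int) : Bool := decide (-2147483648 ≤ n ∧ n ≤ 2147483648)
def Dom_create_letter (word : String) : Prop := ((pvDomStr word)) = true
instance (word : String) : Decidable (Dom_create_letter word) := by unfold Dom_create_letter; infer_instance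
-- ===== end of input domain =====

-- B replaces A's single accumulating dict pass by a dict comprehension over the distinct letters
-- (one rescan of the word per distinct letter); same result, same key order (idiomatic, not faster).

-- ===== PORT A =====
-- iterating a Python string yields its characters as one-character strings
def pvIterStr (word : String) : List String := word.toList.map (fun c => String.singleton c)

def pvStepA (d : PySem.Dict String (List Int)) (p : Int × String) : PySem.Dict String (List Int) :=
  if d.contains p.2 then d.modify p.2 [] (fun l => l ++ [p.1]) else d.insert p.2 [p.1]

def create_letter (word : String) : List (String × List Int) :=
  ((PySem.List.enumerate (pvIterStr word) 0).foldl pvStepA PySem.Dict.empty).items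

-- ===== PORT B =====
-- [i for i, x in enumerate(word) if x == c]
def pvIndices (ls : List String) (c : String) : List Int :=
  ((PySem.List.enumerate ls 0).filter (fun p => p.2 == c)).map (fun p => p.1)

def create_letter_alt (word : String) : List (String × List Int) :=
  (PySem.List.dedup (pvIterStr word)).map (fun c => (c, pvIndices (pvIterStr word) c))

-- ===== PRECONDITION & SPEC =====
def Spec_create_letter (word : String) (out : List (String × List Int)) : Prop := out = create_letter_alt word
instance (word : String) (out : List (String × List Int)) : Decidable (Spec_create_letter word out) := by unfold Spec_create_letter; infer_instance

-- ===== CLAIM (what is proved, stated in full; the proofs are below) =====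
def Claim_equal_create_letter : Prop := ∀ (word : String), Dom_create_letter word → Spec_create_letter word (create_letter word)

-- ===== LEMMAS AND PROOFS =====

theorem pvStepA_getD (d : PySem.Dict String (List Int)) (p : Int × String) (t : String) :
    (pvStepA d p).getD t [] = d.getD t [] ++ (if t = p.2 then [p.1] else []) := by
  unfold pvStepA
  by_cases hc : d.contains p.2 = true
  · rw [if_pos hc]
    by_cases ht : t = p.2
    · subst ht; rw [PySem.Dict.getD_modify_self]; simp
    · rw [PySem.Dict.getD_modify_of_ne _ _ _ ht]; simp [ht]
  · have hcf : d.contains p.2 = false := by simpa using hc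
    rw [if_neg hc]
    by_cases ht : t = p.2
    · subst ht
      rw [PySem.Dict.getD_insert_self, PySem.Dict.getD_of_not_contains _ _ hcf]; simp
    · rw [PySem.Dict.getD_insert_of_ne _ _ _ ht]; simp [ht]

theorem pvStepA_keys (d : PySem.Dict String (List Int)) (p : Int × String) :
    (pvStepA d p).keys = PySem.Set.add d.keys p.2 := by
  unfold pvStepA
  by_cases hc : d.contains p.2 = true
  · have hm : p.2 ∈ d.keys := by
      rw [PySem.Dict.contains_eq_decide_mem_keys] at hc; simpa using hc
    rw [if_pos hc, PySem.Dict.keys_modify, PySem.Dict.keys_insert_of_contains _ _ hc,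
        PySem.Set.add_of_mem hm]
  · have hcf : d.contains p.2 = false := by simpa using hc
    have hm : p.2 ∉ d.keys := by
      rw [PySem.Dict.contains_eq_decide_mem_keys] at hcf; simpa using hcf
    rw [if_neg hc, PySem.Dict.keys_insert_of_not_contains _ _ hcf, PySem.Set.add_of_not_mem hm]

theorem pvFoldA_getD (ls : List String) (s : Int) (d : PySem.Dict String (List Int)) (t : String) :
    ((PySem.List.enumerate ls s).foldl pvStepA d).getD t []
      = d.getD t [] ++ (((PySem.List.enumerate ls s).filter (fun p => p.2 == t)).map (fun p => p.1)) := by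
  induction ls generalizing s d with
  | nil => simp [PySem.List.enumerate_nil]
  | cons x xs ih =>
    rw [PySem.List.enumerate_cons, List.foldl_cons, ih, pvStepA_getD, List.filter_cons]
    by_cases ht : t = x
    · subst ht; simp
    · have ht' : ¬ (x = t) := fun h => ht h.symm
      simp [ht, ht']

theorem pvFoldA_keys (ls : List String) (s : Int) (d : PySem.Dict String (List Int)) :
    ((PySem.List.enumerate ls s).foldl pvStepA d).keys = PySem.Set.update d.keys ls := by
  induction ls generalizing s d with
  | nil => simp [PySem.List.enumerate_nil, PySem.Set.update_nil]
  | cons x xs ih =>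
    rw [PySem.List.enumerate_cons, List.foldl_cons, ih, PySem.Set.update_cons, pvStepA_keys]

-- ===== VERDICT (by name: the statement is the Claim_ definition above) =====
theorem create_letter_spec : Claim_equal_create_letter := by
  intro word _
  unfold Spec_create_letter create_letter create_letter_alt
  set ls := pvIterStr word with hls
  set d := (PySem.List.enumerate ls 0).foldl pvStepA PySem.Dict.empty with hd
  have hkeys : d.keys = PySem.List.dedup ls := by
    rw [hd, pvFoldA_keys, PySem.Dict.keys_empty, PySem.List.dedup_eq_ofList,
        PySem.Set.update_nil_left]
  have hnd : d.keys.Nodup := by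
    rw [hkeys, PySem.List.dedup_eq_ofList]; exact PySem.Set.nodup_ofList ls
  rw [PySem.Dict.items_eq_map_keys d hnd [], hkeys]
  refine List.map_congr_left (fun c _ => ?_)
  rw [hd, pvFoldA_getD, PySem.Dict.getD_empty]
  simp [pvIndices]
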